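-- pv_equiv track=rewrite | github.com/JayB202/code_practice | 프로그래머스/unrated/181921. 배열 만들기 2/배열 만들기 2.py | solution
-- ===== SOURCE A (Python) =====
-- def solution(l, r):
--     answer = []
--     for i in range(l, r+1):
--         if all(k in ["0","5"] for k in str(i)):
--             answer.append(i)
--
--     if answer == []:
--         answer.append(-1)
--     return answer
-- ===== SOURCE B (Python) =====
-- def solution(l, r):
--     # Generate the 0/5-digit numbers level by level (by digit count) instead of
--     # scanning the whole range [l, r].
--     answer = [n for n in (0, 5) if l <= n <= r]
--     level = [5]
--     for _ in range(len(str(r)) if r > 0 else 0):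
--         level = [10 * n + d for n in level for d in (0, 5)]
--         answer += [n for n in level if l <= n <= r]
--     return answer or [-1]
-- ===== Notes on version B (the rewrite author's own statement) =====
-- stated objective: alternative
-- what changed: Instead of scanning every integer in [l, r] and testing its decimal digits, B generates the 0/5-digit numbers directly, level by level (extending a list of prefixes by one digit per pass), and filters them into [l, r].
import Mathlib
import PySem

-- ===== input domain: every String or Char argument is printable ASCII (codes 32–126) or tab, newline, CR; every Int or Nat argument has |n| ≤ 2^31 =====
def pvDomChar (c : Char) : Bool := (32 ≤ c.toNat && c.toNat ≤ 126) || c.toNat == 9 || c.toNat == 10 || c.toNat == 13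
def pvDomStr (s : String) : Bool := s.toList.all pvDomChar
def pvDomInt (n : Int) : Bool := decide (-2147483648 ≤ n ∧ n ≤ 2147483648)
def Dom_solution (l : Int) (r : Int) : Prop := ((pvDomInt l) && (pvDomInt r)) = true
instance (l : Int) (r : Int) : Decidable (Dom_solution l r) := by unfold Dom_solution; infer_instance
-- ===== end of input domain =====

-- B replaces A's scan of every integer in [l, r] with direct level-by-level generation
-- of the 0/5-digit numbers, filtered into [l, r] (a different algorithm, same results).

-- ===== PORT A =====
def solution (l : Int) (r : Int) : List Int :=
  let answer := (PySem.List.pyRange l (r + 1) 1).foldl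
    (fun acc i =>
      if (PySem.Int.toChars i).all (fun k => k == '0' || k == '5') then acc ++ [i] else acc) []
  if answer = [] then answer ++ [-1] else answer

-- ===== PORT B =====
-- level = [10 * n + d for n in level for d in (0, 5)]
def altLevelStep (level : List Int) : List Int :=
  level.flatMap (fun n => [(0 : Int), 5].map (fun d => 10 * n + d))

-- the for-loop of Source B: each pass extends 'level' by one digit and appends its in-range part
def altLoop (l r : Int) : Nat → List Int → List Int → List Int
  | 0, answer, _level => answer
  | k + 1, answer, level =>
    let level' := altLevelStep level
    altLoop l r k (answer ++ level'.filter (fun n => decide (l ≤ n ∧ n ≤ r))) level'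

def solution_alt (l : Int) (r : Int) : List Int :=
  let answer := ([(0 : Int), 5]).filter (fun n => decide (l ≤ n ∧ n ≤ r))
  let answer := altLoop l r (if 0 < r then (PySem.Int.toChars r).length else 0) answer [5]
  if answer = [] then [-1] else answer

-- ===== PRECONDITION & SPEC =====
def Spec_solution (l : Int) (r : Int) (out : List Int) : Prop := out = solution_alt l r
instance (l : Int) (r : Int) (out : List Int) : Decidable (Spec_solution l r out) := by
  unfold Spec_solution; infer_instance

-- ===== CLAIM (what is proved, stated in full; the proofs are below) =====
def Claim_equal_solution : Prop := ∀ (l : Int) (r : Int), Dom_solution l r → Spec_solution l r (solution l r)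

-- ===== LEMMAS AND PROOFS =====

-- all decimal digits of m are 0 or 5
def goodN (m : Nat) : Bool :=
  if _h : m < 10 then (m == 0 || m == 5)
  else ((m % 10 == 0) || (m % 10 == 5)) && goodN (m / 10)
decreasing_by exact Nat.div_lt_self (by omega) (by omega)

-- the k-th level of B's generation: 0/5-digit numbers with leading digit 5 and k+1 digits
def Lv : Nat → List Int
  | 0 => [5]
  | k + 1 => altLevelStep (Lv k)

lemma goodN_lt_ten {m : Nat} (h : m < 10) : goodN m = (m == 0 || m == 5) := by
  rw [goodN]; simp [h]

lemma goodN_ge_ten {m : Nat} (h : ¬ m < 10) :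
    goodN m = (((m % 10 == 0) || (m % 10 == 5)) && goodN (m / 10)) := by
  rw [goodN]; simp [h]

lemma all_toDigits_eq_goodN (m : Nat) :
    ((Nat.toDigits 10 m).all fun c => c == '0' || c == '5') = goodN m := by
  induction m using Nat.strong_induction_on with
  | _ m ih =>
    by_cases h : m < 10
    · rw [Nat.toDigits_of_lt_base h, goodN_lt_ten h]
      interval_cases m <;> decide
    · rw [Nat.toDigits_of_base_le (by omega) (by omega), goodN_ge_ten h,
        List.all_append]
      rw [ih (m / 10) (Nat.div_lt_self (by omega) (by omega))]
      have h10 : m % 10 < 10 := Nat.mod_lt _ (by omega)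
      have hd : (((m % 10).digitChar == '0' || (m % 10).digitChar == '5')
          = ((m % 10 == 0) || (m % 10 == 5))) := by
        set d := m % 10 with hdk
        interval_cases d <;> decide
      simp only [List.all_cons, List.all_nil, Bool.and_true, hd]
      exact Bool.and_comm _ _

lemma goodN_eq_zero_or_five_le {m : Nat} (h : goodN m = true) : m = 0 ∨ 5 ≤ m := by
  by_cases hm : m < 10
  · rw [goodN_lt_ten hm] at h
    simp only [Bool.or_eq_true, beq_iff_eq] at h
    omega
  · omega

lemma goodN_five : goodN 5 = true := by rw [goodN_lt_ten (by omega)]; decide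

lemma goodN_zero : goodN 0 = true := by rw [goodN_lt_ten (by omega)]; decide

lemma goodN_mul10_add {a d : Nat} (ha : 1 ≤ a) (hd : d = 0 ∨ d = 5) :
    goodN (10 * a + d) = goodN a := by
  have h : ¬ 10 * a + d < 10 := by omega
  rw [goodN_ge_ten h]
  have h1 : (10 * a + d) % 10 = d := by omega
  have h2 : (10 * a + d) / 10 = a := by omega
  rw [h1, h2]
  rcases hd with rfl | rfl <;> simp

lemma mem_Lv (k : Nat) (n : Int) :
    n ∈ Lv k ↔ 5 * 10 ^ k ≤ n ∧ n < 10 ^ (k + 1) ∧ goodN n.toNat = true := by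
  induction k generalizing n with
  | zero =>
    have e1 : (5:Int) * 10 ^ 0 = 5 := by norm_num
    have e2 : (10:Int) ^ (0 + 1) = 10 := by norm_num
    rw [e1, e2]
    simp only [Lv, List.mem_singleton]
    constructor
    · rintro rfl
      refine ⟨by norm_num, by norm_num, ?_⟩
      rw [show (5:Int).toNat = 5 from rfl]; exact goodN_five
    · rintro ⟨h5, h10, hg⟩
      have hm : n.toNat < 10 := by omega
      rw [goodN_lt_ten hm] at hg
      simp only [Bool.or_eq_true, beq_iff_eq] at hg
      omega
  | succ k ih =>
    have hP : (0:Int) < 10 ^ k := by positivity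
    have e1 : (10:Int) ^ (k + 1) = 10 ^ k * 10 := pow_succ 10 k
    have e2 : (10:Int) ^ (k + 1 + 1) = 10 ^ (k + 1) * 10 := pow_succ 10 (k + 1)
    constructor
    · intro hn
      simp only [Lv, altLevelStep, List.mem_flatMap, List.mem_map] at hn
      obtain ⟨m, hm, d, hd, hval⟩ := hn
      obtain ⟨hm5, hm10, hmg⟩ := (ih m).mp hm
      have hd' : d = 0 ∨ d = 5 := by
        simp only [List.mem_cons, List.not_mem_nil, or_false] at hd; tauto
      have hnn : n = 10 * m + d := hval.symm
      have haN : (1:Nat) ≤ m.toNat := by omega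
      have htn : n.toNat = 10 * m.toNat + d.toNat := by omega
      have hdN : d.toNat = 0 ∨ d.toNat = 5 := by omega
      refine ⟨by omega, by omega, ?_⟩
      rw [htn, goodN_mul10_add haN hdN]; exact hmg
    · rintro ⟨h5, h10, hg⟩
      have hge : (10:Int) ≤ n := by omega
      have hmN : ¬ n.toNat < 10 := by omega
      rw [goodN_ge_ten hmN] at hg
      simp only [Bool.and_eq_true, Bool.or_eq_true, beq_iff_eq] at hg
      obtain ⟨hd, ha⟩ := hg
      set a : Nat := n.toNat / 10 with hadef
      have hna : n.toNat = 10 * a + n.toNat % 10 := by omega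
      have hd' : n.toNat % 10 = 0 ∨ n.toNat % 10 = 5 := hd
      have ham : ((a : Int)) ∈ Lv k := by
        rw [ih]
        exact ⟨by omega, by omega, by simpa using ha⟩
      simp only [Lv, altLevelStep, List.mem_flatMap, List.mem_map]
      refine ⟨(a : Int), ham, ((n.toNat % 10 : Nat) : Int), ?_, ?_⟩
      · rcases hd' with h | h <;> rw [h] <;> simp
      · push_cast; omega

lemma lv_pos {k : Nat} {n : Int} (h : n ∈ Lv k) : 0 < n := by
  obtain ⟨h5, -, -⟩ := (mem_Lv k n).mp h
  have hP : (0:Int) < 10 ^ k := by positivity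
  nlinarith

lemma pairwise_altLevelStep {xs : List Int} (h : xs.Pairwise (· < ·)) :
    (altLevelStep xs).Pairwise (· < ·) := by
  induction xs with
  | nil => simp [altLevelStep]
  | cons x xs ih =>
    have hx := List.pairwise_cons.mp h
    have hstep : altLevelStep (x :: xs) = [10 * x + 0, 10 * x + 5] ++ altLevelStep xs := by
      simp [altLevelStep]
    rw [hstep, List.pairwise_append]
    refine ⟨by norm_num, ih hx.2, ?_⟩
    intro a ha b hb
    simp only [List.mem_cons, List.not_mem_nil, or_false] at ha
    simp only [altLevelStep, List.mem_flatMap, List.mem_map] at hb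
    obtain ⟨m, hm, d, hd, hval⟩ := hb
    have hxm : x < m := hx.1 m hm
    have hd' : d = 0 ∨ d = 5 := by
      simp only [List.mem_cons, List.not_mem_nil, or_false] at hd; tauto
    rcases ha with rfl | rfl <;> rcases hd' with rfl | rfl <;> omega

lemma pairwise_Lv (k : Nat) : (Lv k).Pairwise (· < ·) := by
  induction k with
  | zero => simp [Lv]
  | succ k ih => exact pairwise_altLevelStep ih

lemma altLoop_eq (l r : Int) (f : Nat) : ∀ (k : Nat) (ans : List Int),
    altLoop l r f ans (Lv k) =
      ans ++ (List.range f).flatMap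
        (fun j => (Lv (k + 1 + j)).filter (fun n => decide (l ≤ n ∧ n ≤ r))) := by
  induction f with
  | zero => intro k ans; simp [altLoop]
  | succ f ih =>
    intro k ans
    have hstep : altLevelStep (Lv k) = Lv (k + 1) := rfl
    have hcg : (List.range f).flatMap
          (fun j => (Lv (k + 1 + 1 + j)).filter (fun n => decide (l ≤ n ∧ n ≤ r))) =
        (List.range f).flatMap
          (fun j => (Lv (k + 1 + Nat.succ j)).filter (fun n => decide (l ≤ n ∧ n ≤ r))) :=
      List.flatMap_congr (fun j _ => by
        rw [show k + 1 + 1 + j = k + 1 + Nat.succ j by omega])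
    show altLoop l r f (ans ++ (altLevelStep (Lv k)).filter (fun n => decide (l ≤ n ∧ n ≤ r)))
        (altLevelStep (Lv k)) = _
    rw [hstep, ih (k + 1), List.range_succ_eq_map, List.flatMap_cons, List.flatMap_map,
      List.append_assoc, hcg]

lemma altLoop_from_five (l r : Int) (f : Nat) (ans : List Int) :
    altLoop l r f ans [5] =
      ans ++ (List.range f).flatMap
        (fun j => (Lv (0 + 1 + j)).filter (fun n => decide (l ≤ n ∧ n ≤ r))) := by
  have h := altLoop_eq l r f 0 ans
  rw [show Lv 0 = [(5:Int)] from rfl] at h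
  exact h

lemma pGood_iff (i : Int) :
    ((PySem.Int.toChars i).all (fun k => k == '0' || k == '5') = true) ↔
      (0 ≤ i ∧ goodN i.toNat = true) := by
  by_cases hneg : i < 0
  · simp [PySem.Int.toChars, hneg]
  · have hpos : 0 ≤ i := not_lt.mp hneg
    rw [show PySem.Int.toChars i = Nat.toDigits 10 i.toNat by
      simp [PySem.Int.toChars, not_lt.mpr hpos]]
    rw [all_toDigits_eq_goodN]
    exact ⟨fun h => ⟨hpos, h⟩, fun h => h.2⟩

-- membership in A's pre-fallback list
lemma mem_listA (l r i : Int) :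
    i ∈ (PySem.List.pyRange l (r + 1) 1).filter
        (fun i => (PySem.Int.toChars i).all (fun k => k == '0' || k == '5')) ↔
      l ≤ i ∧ i ≤ r ∧ 0 ≤ i ∧ goodN i.toNat = true := by
  rw [List.mem_filter, PySem.List.mem_pyRange_one, pGood_iff]
  constructor
  · rintro ⟨⟨h1, h2⟩, h3, h4⟩; exact ⟨h1, by omega, h3, h4⟩
  · rintro ⟨h1, h2, h3, h4⟩; exact ⟨⟨h1, by omega⟩, h3, h4⟩

-- a bracketing power of ten exists for every 0/5-digit number ≥ 5
lemma exists_bracket (m : Nat) (h5 : 5 ≤ m) (hg : goodN m = true) :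
    ∃ k : Nat, 5 * 10 ^ k ≤ (m : Int) ∧ (m : Int) < 10 ^ (k + 1) := by
  induction m using Nat.strong_induction_on with
  | _ m ih =>
    by_cases hm : m < 10
    · exact ⟨0, by push_cast; omega, by push_cast; omega⟩
    · rw [goodN_ge_ten hm] at hg
      simp only [Bool.and_eq_true] at hg
      have ha : goodN (m / 10) = true := hg.2
      have ha5 : 5 ≤ m / 10 := by
        rcases goodN_eq_zero_or_five_le ha with h | h
        · omega
        · exact h
      obtain ⟨k, hk1, hk2⟩ := ih (m / 10) (Nat.div_lt_self (by omega) (by omega)) ha5 ha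
      have e1 : (10:Int) ^ (k + 1) = 10 ^ k * 10 := pow_succ 10 k
      have e2 : (10:Int) ^ (k + 1 + 1) = 10 ^ (k + 1) * 10 := pow_succ 10 (k + 1)
      have hdiv : (m : Int) = 10 * ((m / 10 : Nat) : Int) + ((m % 10 : Nat) : Int) := by
        push_cast; omega
      have hmod : ((m % 10 : Nat) : Int) < 10 := by push_cast; omega
      have hmod0 : (0:Int) ≤ ((m % 10 : Nat) : Int) := by positivity
      exact ⟨k + 1, by omega, by omega⟩

-- the filtered flatMap over levels is sorted
lemma pairwise_flat (l r : Int) (f : Nat) :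
    ((List.range f).flatMap
      (fun j => (Lv (0 + 1 + j)).filter (fun n => decide (l ≤ n ∧ n ≤ r)))).Pairwise (· < ·) := by
  induction f with
  | zero => simp
  | succ f ih =>
    rw [List.range_succ, List.flatMap_append, List.flatMap_singleton, List.pairwise_append]
    refine ⟨ih, (pairwise_Lv _).filter _, ?_⟩
    intro a ha b hb
    simp only [List.mem_flatMap, List.mem_range] at ha
    obtain ⟨j, hj, haj⟩ := ha
    have haL := (mem_Lv _ _).mp (List.mem_of_mem_filter haj)
    have hbL := (mem_Lv _ _).mp (List.mem_of_mem_filter hb)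
    have hmono : (10:Int) ^ (0 + 1 + j + 1) ≤ 10 ^ (0 + 1 + f) :=
      pow_le_pow_right₀ (by norm_num) (by omega)
    have hb5 : (0:Int) < 10 ^ (0 + 1 + f) := by positivity
    omega

lemma pairwise_listB (l r : Int) (f : Nat) :
    (([(0 : Int), 5]).filter (fun n => decide (l ≤ n ∧ n ≤ r)) ++
      (List.range f).flatMap
        (fun j => (Lv (0 + 1 + j)).filter (fun n => decide (l ≤ n ∧ n ≤ r)))).Pairwise (· < ·) := by
  rw [List.pairwise_append]
  refine ⟨(by norm_num : ([(0:Int), 5]).Pairwise (· < ·)).filter _, pairwise_flat l r f, ?_⟩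
  intro a ha b hb
  have ha' := List.mem_of_mem_filter ha
  simp only [List.mem_cons, List.not_mem_nil, or_false] at ha'
  simp only [List.mem_flatMap, List.mem_range] at hb
  obtain ⟨j, hj, hbj⟩ := hb
  have hbL := (mem_Lv _ _).mp (List.mem_of_mem_filter hbj)
  have h10 : (10:Int) ^ (0 + 1) ≤ 10 ^ (0 + 1 + j) :=
    pow_le_pow_right₀ (by norm_num) (by omega)
  have e : (10:Int) ^ (0 + 1) = 10 := by norm_num
  rcases ha' with rfl | rfl <;> omega

lemma main_lists_eq (l r : Int) :
    (PySem.List.pyRange l (r + 1) 1).filter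
        (fun i => (PySem.Int.toChars i).all (fun k => k == '0' || k == '5')) =
      ([(0 : Int), 5]).filter (fun n => decide (l ≤ n ∧ n ≤ r)) ++
        (List.range (if 0 < r then (PySem.Int.toChars r).length else 0)).flatMap
          (fun j => (Lv (0 + 1 + j)).filter (fun n => decide (l ≤ n ∧ n ≤ r))) := by
  set f : Nat := if 0 < r then (PySem.Int.toChars r).length else 0 with hf
  have hpwA := (PySem.List.pairwise_lt_pyRange_one l (r + 1)).filter
    (fun i => (PySem.Int.toChars i).all (fun k => k == '0' || k == '5'))
  have hpwB := pairwise_listB l r f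
  have hmem : ∀ i : Int,
      i ∈ (PySem.List.pyRange l (r + 1) 1).filter
          (fun i => (PySem.Int.toChars i).all (fun k => k == '0' || k == '5')) ↔
        i ∈ ([(0 : Int), 5]).filter (fun n => decide (l ≤ n ∧ n ≤ r)) ++
          (List.range f).flatMap
            (fun j => (Lv (0 + 1 + j)).filter (fun n => decide (l ≤ n ∧ n ≤ r))) := by
    intro i
    rw [mem_listA]
    simp only [List.mem_append, List.mem_filter, List.mem_flatMap, List.mem_range,
      List.mem_cons, List.not_mem_nil, or_false, decide_eq_true_eq]
    constructor
    · rintro ⟨h1, h2, h3, h4⟩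
      by_cases h0 : i = 0
      · exact Or.inl ⟨Or.inl h0, by omega⟩
      by_cases h5i : i = 5
      · exact Or.inl ⟨Or.inr h5i, by omega⟩
      · have hge5 : 5 ≤ i.toNat := by
          rcases goodN_eq_zero_or_five_le h4 with h | h
          · omega
          · exact h
        have hge10 : 10 ≤ i.toNat := by
          by_cases hlt : i.toNat < 10
          · rw [goodN_lt_ten hlt] at h4
            simp only [Bool.or_eq_true, beq_iff_eq] at h4
            omega
          · omega
        obtain ⟨k, hk1, hk2⟩ := exists_bracket i.toNat hge5 h4
        have hcast : ((i.toNat : Nat) : Int) = i := by omega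
        rw [hcast] at hk1 hk2
        have hk0 : 1 ≤ k := by
          by_contra hk
          have hk' : k = 0 := by omega
          rw [hk'] at hk2
          norm_num at hk2
          omega
        have hrpos : 0 < r := by omega
        have hflen : f = (Nat.toDigits 10 r.toNat).length := by
          rw [hf, if_pos hrpos]
          congr 1
          simp [PySem.Int.toChars, not_lt.mpr (le_of_lt hrpos)]
        have hkle : k ≤ f := by
          by_contra hkf
          push Not at hkf
          have hlen1 : 0 < (Nat.toDigits 10 r.toNat).length := Nat.length_toDigits_pos
          have hk1' : 1 ≤ k - 1 ∨ k - 1 = 0 := by omega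
          rcases hk1' with hk1' | hk1'
          · have hlt : r.toNat < 10 ^ (k - 1) :=
              (Nat.length_toDigits_le_iff (by norm_num) (by omega)).mp (by omega)
            have hltZ : (r.toNat : Int) < (10:Int) ^ (k - 1) := by
              exact_mod_cast hlt
            have hrZ : ((r.toNat : Nat) : Int) = r := by omega
            have hpw : (10:Int) ^ k = 10 ^ (k - 1) * 10 := by
              rw [← pow_succ]
              congr 1
              omega
            have hP : (0:Int) < 10 ^ (k - 1) := by positivity
            omega
          · omega
        refine Or.inr ⟨k - 1, by omega, ?_, by omega⟩
        have e : 0 + 1 + (k - 1) = k := by omega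
        rw [e, mem_Lv]
        exact ⟨hk1, hk2, h4⟩
    · rintro (⟨h01, h2⟩ | ⟨j, hj, hmem, hp1, hp2⟩)
      · rcases h01 with rfl | rfl
        · exact ⟨h2.1, h2.2, le_refl 0, goodN_zero⟩
        · exact ⟨h2.1, h2.2, by omega, by rw [show (5:Int).toNat = 5 from rfl]; exact goodN_five⟩
      · obtain ⟨-, -, hg⟩ := (mem_Lv _ _).mp hmem
        have := lv_pos hmem
        exact ⟨hp1, hp2, by omega, hg⟩
  exact List.Perm.eq_of_pairwise (fun a b _ _ hab hba => by omega) hpwA hpwB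
    ((List.perm_ext_iff_of_nodup hpwA.nodup hpwB.nodup).mpr hmem)

-- ===== VERDICT (by name: the statement is the Claim_ definition above) =====
theorem solution_spec : Claim_equal_solution := by
  intro l r _hdom
  unfold Spec_solution
  have hA : solution l r =
      (if ((PySem.List.pyRange l (r + 1) 1).foldl
          (fun acc i => if (PySem.Int.toChars i).all (fun k => k == '0' || k == '5')
            then acc ++ [i] else acc) []) = []
        then ((PySem.List.pyRange l (r + 1) 1).foldl
          (fun acc i => if (PySem.Int.toChars i).all (fun k => k == '0' || k == '5')
            then acc ++ [i] else acc) []) ++ [-1]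
        else ((PySem.List.pyRange l (r + 1) 1).foldl
          (fun acc i => if (PySem.Int.toChars i).all (fun k => k == '0' || k == '5')
            then acc ++ [i] else acc) [])) := rfl
  have hB : solution_alt l r =
      (if (altLoop l r (if 0 < r then (PySem.Int.toChars r).length else 0)
            (([(0 : Int), 5]).filter (fun n => decide (l ≤ n ∧ n ≤ r))) [5]) = []
        then [-1]
        else (altLoop l r (if 0 < r then (PySem.Int.toChars r).length else 0)
            (([(0 : Int), 5]).filter (fun n => decide (l ≤ n ∧ n ≤ r))) [5])) := rfl
  rw [hA, hB]
  rw [show (fun acc i =>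
      if (PySem.Int.toChars i).all (fun k => k == '0' || k == '5') then acc ++ [i] else acc)
    = (fun acc (i : Int) =>
      if ((fun i => (PySem.Int.toChars i).all (fun k => k == '0' || k == '5')) i) = true
      then acc ++ [(fun (x : Int) => x) i] else acc) from rfl,
    PySem.List.foldl_append_if, altLoop_from_five]
  simp only [List.nil_append, List.map_id']
  rw [main_lists_eq l r]
  set X := ([(0 : Int), 5]).filter (fun n => decide (l ≤ n ∧ n ≤ r)) ++
    (List.range (if 0 < r then (PySem.Int.toChars r).length else 0)).flatMap
      (fun j => (Lv (0 + 1 + j)).filter (fun n => decide (l ≤ n ∧ n ≤ r))) with hX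
  by_cases hXe : X = [] <;> simp [hXe]
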